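-- pv_equiv track=rewrite | github.com/need-singularity/anima | experiments/law_combo.py | make_faction_assignments
-- ===== SOURCE A (Python) =====
-- from typing import List, Dict, Tuple
--
-- def make_faction_assignments(n_cells: int, mode: str) -> List[int]:
--     """Assign cells to factions.
--
--     mode='equal':     12 equal factions (~5-6 cells each)
--     mode='hub_spoke': 1 hub (32 cells) + 4 spokes (8 cells each)
--     """
--     if mode == 'equal':
--         n_factions = 12
--         assignments = [i % n_factions for i in range(n_cells)]
--     elif mode == 'hub_spoke':
--         # Hub: first 32 cells -> faction 0
--         # Spokes: 4 groups of 8 -> factions 1-4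
--         assignments = []
--         for i in range(n_cells):
--             if i < 32:
--                 assignments.append(0)  # hub
--             else:
--                 spoke = 1 + (i - 32) // 8
--                 assignments.append(min(spoke, 4))
--     else:
--         raise ValueError(f"Unknown mode: {mode}")
--     return assignments
-- ===== SOURCE B (Python) =====
-- def make_faction_assignments(n_cells: int, mode: str):
--     """Assign cells to factions by building run-length blocks and slicing."""
--     n = max(0, n_cells)
--     if mode == 'equal':
--         reps = (n + 11) // 12
--         return (list(range(12)) * reps)[:n]
--     elif mode == 'hub_spoke':
--         base = [0] * 32 + [1] * 8 + [2] * 8 + [3] * 8 + [4] * max(0, n - 56)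
--         return base[:n]
--     else:
--         raise ValueError(f"Unknown mode: {mode}")
-- ===== Notes on version B (the rewrite author's own statement) =====
-- stated objective: alternative
-- what changed: B assembles each faction list as concatenated run-length blocks ([0]*32+[1]*8+... and a tiled range(12)) truncated with a slice, instead of A's per-index loop computing each element.
import Mathlib
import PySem

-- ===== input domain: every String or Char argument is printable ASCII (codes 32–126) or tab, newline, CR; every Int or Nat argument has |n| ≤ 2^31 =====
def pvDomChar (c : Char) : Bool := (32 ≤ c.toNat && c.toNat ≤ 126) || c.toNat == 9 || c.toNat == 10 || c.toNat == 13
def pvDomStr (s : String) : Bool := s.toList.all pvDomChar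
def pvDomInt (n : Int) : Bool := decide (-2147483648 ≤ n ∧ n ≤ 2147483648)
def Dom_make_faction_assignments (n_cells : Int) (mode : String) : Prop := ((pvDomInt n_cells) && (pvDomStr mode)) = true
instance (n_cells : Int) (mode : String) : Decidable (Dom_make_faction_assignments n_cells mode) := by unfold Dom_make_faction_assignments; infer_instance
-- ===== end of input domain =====

-- B builds each branch as concatenated run-length blocks truncated to length, instead of A's
-- element-by-element loop over range(n_cells); return values proved equal on both valid modes.

-- ===== PORT A =====
def make_faction_assignments (n_cells : Int) (mode : String) : List Int :=
  if mode = "equal" then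
    -- [i % 12 for i in range(n_cells)]
    (PySem.List.pyRange 0 n_cells 1).map (fun i => PySem.Int.mod i 12)
  else if mode = "hub_spoke" then
    (PySem.List.pyRange 0 n_cells 1).foldl
      (fun acc i => if i < 32 then acc ++ [(0 : Int)]
                    else acc ++ [min (1 + PySem.Int.floordiv (i - 32) 8) 4]) []
  else []  -- raise ValueError: excluded by Pre_

-- ===== PORT B =====
def make_faction_assignments_alt (n_cells : Int) (mode : String) : List Int :=
  let n := max 0 n_cells
  if mode = "equal" then
    let reps := PySem.Int.floordiv (n + 11) 12
    -- (list(range(12)) * reps)[:n]; n ≥ 0, so the slice is exactly take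
    ((List.replicate reps.toNat (PySem.List.pyRange 0 12 1)).flatten).take n.toNat
  else if mode = "hub_spoke" then
    -- [0]*32 + [1]*8 + [2]*8 + [3]*8 + [4]*max(0, n-56), then [:n]
    (List.replicate 32 (0 : Int) ++ List.replicate 8 1 ++ List.replicate 8 2 ++
     List.replicate 8 3 ++ List.replicate (max 0 (n - 56)).toNat 4).take n.toNat
  else []  -- raise ValueError: excluded by Pre_

-- ===== PRECONDITION & SPEC =====
-- A raises ValueError on any mode other than 'equal'/'hub_spoke' (and so does B): excluded.
def Pre_make_faction_assignments (n_cells : Int) (mode : String) : Prop :=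
  mode = "equal" ∨ mode = "hub_spoke"
instance (n_cells : Int) (mode : String) : Decidable (Pre_make_faction_assignments n_cells mode) := by unfold Pre_make_faction_assignments; infer_instance
def pvWitness_make_faction_assignments : Int × String := (10, "hub_spoke")

def Spec_make_faction_assignments (n_cells : Int) (mode : String) (out : List Int) : Prop := out = make_faction_assignments_alt n_cells mode
instance (n_cells : Int) (mode : String) (out : List Int) : Decidable (Spec_make_faction_assignments n_cells mode out) := by unfold Spec_make_faction_assignments; infer_instance

-- ===== CLAIM (what is proved, stated in full; the proofs are below) =====
def Claim_equal_make_faction_assignments : Prop := ∀ (n_cells : Int) (mode : String), Dom_make_faction_assignments n_cells mode → Pre_make_faction_assignments n_cells mode → Spec_make_faction_assignments n_cells mode (make_faction_assignments n_cells mode)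

-- ===== LEMMAS AND PROOFS =====

-- value A's 'hub_spoke' loop appends for index i (branches in A's order)
def pvHubVal (i : Int) : Int :=
  if i < 32 then 0 else min (1 + PySem.Int.floordiv (i - 32) 8) 4

lemma pyRange_nonpos (n : Int) (h : n ≤ 0) : PySem.List.pyRange 0 n 1 = [] := by
  simp [PySem.List.pyRange]; omega

lemma pyRange12 : PySem.List.pyRange 0 (12:Int) 1 = (List.range 12).map (fun k => (k:Int)) := by
  exact_mod_cast PySem.List.pyRange_zero_natCast 12

-- the tiled list: r copies of range k flattened, elementwise
lemma flatten_replicate_range (r k : Nat) :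
    (List.replicate r (List.range k)).flatten = (List.range (r * k)).map (fun i => i % k) := by
  induction r with
  | zero => simp
  | succ r ih =>
      rw [List.replicate_succ, List.flatten_cons, ih, Nat.succ_mul, Nat.add_comm,
          List.range_add, List.map_append]
      congr 1
      · have h : ∀ i ∈ List.range k, i % k = i :=
          fun i hi => Nat.mod_eq_of_lt (List.mem_range.mp hi)
        exact ((List.map_congr_left h).trans (by simp)).symm
      · rw [List.map_map]
        exact List.map_congr_left (fun i _ => by simp)

-- A's hub_spoke loop is a map of pvHubVal
lemma hub_foldl (l : List Int) (acc : List Int) :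
    l.foldl (fun acc i => if i < 32 then acc ++ [(0 : Int)]
                          else acc ++ [min (1 + PySem.Int.floordiv (i - 32) 8) 4]) acc
      = acc ++ l.map pvHubVal := by
  induction l generalizing acc with
  | nil => simp
  | cons x xs ih =>
      simp only [List.foldl_cons, List.map_cons, pvHubVal]
      by_cases hx : x < 32
      · rw [if_pos hx, ih, if_pos hx]; simp
      · rw [if_neg hx, ih, if_neg hx]; simp

-- equal branch
lemma equal_eq (n : Int) :
    (PySem.List.pyRange 0 n 1).map (fun i => PySem.Int.mod i 12)
      = ((List.replicate (PySem.Int.floordiv (max 0 n + 11) 12).toNat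
            (PySem.List.pyRange 0 12 1)).flatten).take (max 0 n).toNat := by
  by_cases h : n ≤ 0
  · rw [pyRange_nonpos n h]
    have h1 : max 0 n = 0 := by omega
    simp [h1, PySem.Int.floordiv]
  · obtain ⟨m, rfl⟩ : ∃ m : Nat, n = (m : Int) := ⟨n.toNat, by omega⟩
    have hmax : max 0 (m:Int) = (m:Int) := by omega
    rw [hmax]
    have hfd : (PySem.Int.floordiv ((m:Int) + 11) 12).toNat = (m + 11) / 12 := by
      have := PySem.Int.floordiv_natCast (m + 11) 12
      push_cast at this ⊢
      rw [this]; omega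
    have key : ((List.replicate ((m + 11) / 12) ((List.range 12).map (fun k => (k:Int)))).flatten)
        = (List.range (((m + 11) / 12) * 12)).map (fun i => (((i % 12 : Nat)) : Int)) := by
      have h1 : List.replicate ((m + 11) / 12) ((List.range 12).map (fun k => (k:Int)))
          = (List.replicate ((m + 11) / 12) (List.range 12)).map (fun l => l.map (fun k : Nat => (k:Int))) := by
        simp [List.flatMap]
        exact Or.inr (by decide)
      rw [h1, ← List.map_flatten, flatten_replicate_range, List.map_map]
      rfl
    rw [hfd, PySem.List.pyRange_zero_natCast, pyRange12, Int.toNat_natCast, key,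
        ← List.map_take, List.take_range,
        Nat.min_eq_left (by omega : m ≤ (m + 11) / 12 * 12), List.map_map]
    exact List.map_congr_left (fun i _ => by
      simp [Function.comp])

-- hub_spoke branch
lemma hub_eq (n : Int) :
    (PySem.List.pyRange 0 n 1).map pvHubVal
      = (List.replicate 32 (0 : Int) ++ List.replicate 8 1 ++ List.replicate 8 2 ++
         List.replicate 8 3 ++ List.replicate (max 0 (max 0 n - 56)).toNat 4).take (max 0 n).toNat := by
  by_cases h : n ≤ 0
  · rw [pyRange_nonpos n h]
    have h1 : max 0 n = 0 := by omega
    simp [h1]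
  · obtain ⟨m, rfl⟩ : ∃ m : Nat, n = (m : Int) := ⟨n.toNat, by omega⟩
    have hmax : max 0 (m:Int) = (m:Int) := by omega
    have htail : (max 0 ((m:Int) - 56)).toNat = m - 56 := by omega
    rw [hmax, htail, Int.toNat_natCast, PySem.List.pyRange_zero_natCast, List.map_map]
    apply List.ext_getElem
    · simp; omega
    · intro j hj hj'
      simp only [List.getElem_map, List.getElem_range, List.getElem_take,
        List.getElem_append, List.length_replicate, List.length_append,
        List.getElem_replicate, Function.comp]
      by_cases h32 : j < 32
      · simp only [pvHubVal, if_pos (show ((j:Int) < 32) by omega)]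
        split_ifs <;> omega
      · have hcast : (j : Int) - 32 = ((j - 32 : Nat) : Int) := by omega
        have hfd : PySem.Int.floordiv (((j - 32 : Nat) : Nat) : Int) 8 = (((j - 32) / 8 : Nat) : Int) := by
          exact_mod_cast PySem.Int.floordiv_natCast (j - 32) 8
        have hv : pvHubVal (j:Int) = min (1 + ((j - 32) / 8 : Nat) : Int) 4 := by
          rw [pvHubVal, if_neg (by omega), hcast, hfd]
        rw [hv]
        split_ifs <;> omega

-- ===== VERDICT (by name: the statement is the Claim_ definition above) =====
theorem make_faction_assignments_spec : Claim_equal_make_faction_assignments := by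
  intro n mode _ hpre
  unfold Spec_make_faction_assignments make_faction_assignments make_faction_assignments_alt
  rcases hpre with rfl | rfl
  · simpa using equal_eq n
  · simp only [String.reduceEq, if_false, if_true]
    rw [hub_foldl, List.nil_append]
    simpa using hub_eq n
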